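-- pv_equiv track=rewrite | github.com/robtsai/advent-of-code-2021 | 14_polymerization.py | h_to_elements
-- ===== SOURCE A (Python) =====
-- from collections import defaultdict
--
-- def h_to_elements(h, polymer):
--     # this is tricky, as imagine you have HNNBBCHNCCCBBNBC
--     # HN: 2, NN: 1, NB:2, BB:2, BC:2, CH:1, NC: 1, CC:2, CB: 1, BN:1
--     elements = defaultdict(lambda: 0)
--
--     # lets make it a list of tuples first, we want to order it and take the largest one first
--     t = sorted([(k, v) for k, v in h.items()], key=lambda x: x[1], reverse=True)
--
--     # lets always just count first letters, because second letters always become first letters of the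
--     # next pair, but remember we have to add one extra last letter
--     answer = defaultdict(lambda: 0)
--     while t:
--         pair, counter = t.pop(0)
--         firstletter = pair[0]
--         answer[firstletter] += counter
--
--     extra = polymer[-1]
--     answer[extra] += 1
--     sorted_answer = sorted(
--         [(k, v) for k, v in answer.items()], key=lambda x: x[1], reverse=True
--     )
--     largest = sorted_answer[0][1]
--     smallest = sorted_answer[-1][1]
--     return largest - smallest
-- ===== SOURCE B (Python) =====
-- from collections import defaultdict
--
-- def h_to_elements(h, polymer):
--     # one direct pass over the pair counts: count first letters, add the last
--     # letter of the polymer, then a single linear max/min scan (no sorting)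
--     counts = defaultdict(int)
--     for pair, v in h.items():
--         counts[pair[0]] += v
--     counts[polymer[-1]] += 1
--     vals = counts.values()
--     return max(vals) - min(vals)
-- ===== Notes on version B (the rewrite author's own statement) =====
-- stated objective: faster
-- what changed: B accumulates per-letter counts in one pass over the unsorted pair dict and returns max(values) - min(values) by a linear scan, replacing A's two sorts (the decorative O(n log n) sort of the pairs and the sort-then-index extraction of largest/smallest).
import Mathlib
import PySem

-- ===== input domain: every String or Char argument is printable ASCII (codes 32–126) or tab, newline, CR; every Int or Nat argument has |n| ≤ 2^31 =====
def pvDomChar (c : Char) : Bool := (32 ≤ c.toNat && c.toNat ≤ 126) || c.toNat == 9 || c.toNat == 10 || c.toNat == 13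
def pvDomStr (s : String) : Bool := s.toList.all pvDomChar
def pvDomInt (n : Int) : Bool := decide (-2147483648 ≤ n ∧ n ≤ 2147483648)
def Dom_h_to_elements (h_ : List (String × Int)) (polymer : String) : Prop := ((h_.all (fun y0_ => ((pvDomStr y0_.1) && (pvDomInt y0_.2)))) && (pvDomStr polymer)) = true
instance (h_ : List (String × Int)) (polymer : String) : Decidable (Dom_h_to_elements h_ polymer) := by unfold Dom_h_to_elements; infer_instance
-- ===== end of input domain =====

-- B replaces A's two sorts by one unsorted counting pass plus a linear max/min scan; same result, simpler.

-- ===== PORT A =====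
-- literal transliteration: sort the pair counts by value descending, pop-and-count
-- first letters, add the last polymer letter, sort the counts by value descending,
-- return first value minus last value
def h_to_elements (h_ : List (String × Int)) (polymer : String) : Int :=
  let t := PySem.List.sorted (PySem.Dict.ofList h_).items (fun x => x.2) true
  let answer := t.foldl
    (fun (d : PySem.Dict Char Int) pc =>
      d.modify (PySem.List.pyGetD pc.1.toList 0 ' ') 0 (· + pc.2))
    PySem.Dict.empty
  let extra := PySem.List.pyGetD polymer.toList (-1) ' '
  let answer := answer.modify extra 0 (· + 1)
  let sorted_answer := PySem.List.sorted answer.items (fun x => x.2) true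
  let largest := (PySem.List.pyGetD sorted_answer 0 (' ', 0)).2
  let smallest := (PySem.List.pyGetD sorted_answer (-1) (' ', 0)).2
  largest - smallest

-- ===== PORT B =====
-- one counting pass over the unsorted pair dict, then max/min of the values
def h_to_elements_alt (h_ : List (String × Int)) (polymer : String) : Int :=
  let counts := (PySem.Dict.ofList h_).items.foldl
    (fun (d : PySem.Dict Char Int) pc =>
      d.modify (PySem.List.pyGetD pc.1.toList 0 ' ') 0 (· + pc.2))
    PySem.Dict.empty
  let counts := counts.modify (PySem.List.pyGetD polymer.toList (-1) ' ') 0 (· + 1)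
  let vals := counts.values
  (PySem.List.max? vals (fun x => x)).getD 0 - (PySem.List.min? vals (fun x => x)).getD 0

-- ===== PRECONDITION & SPEC =====
-- Pre_ excludes exactly the inputs where the Python raises IndexError:
-- an empty polymer (polymer[-1]) or an empty-string pair key (pair[0]).
def Pre_h_to_elements (h_ : List (String × Int)) (polymer : String) : Prop :=
  polymer ≠ "" ∧ ∀ p ∈ h_, p.1 ≠ ""
instance (h_ : List (String × Int)) (polymer : String) : Decidable (Pre_h_to_elements h_ polymer) := by unfold Pre_h_to_elements; infer_instance
def pvWitness_h_to_elements : (List (String × Int)) × String := ([("NN", 2), ("NC", 1)], "NNCB")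

def Spec_h_to_elements (h_ : List (String × Int)) (polymer : String) (out : Int) : Prop := out = h_to_elements_alt h_ polymer
instance (h_ : List (String × Int)) (polymer : String) (out : Int) : Decidable (Spec_h_to_elements h_ polymer out) := by unfold Spec_h_to_elements; infer_instance

-- ===== CLAIM (what is proved, stated in full; the proofs are below) =====
def Claim_equal_h_to_elements : Prop := ∀ (h_ : List (String × Int)) (polymer : String), Dom_h_to_elements h_ polymer → Pre_h_to_elements h_ polymer → Spec_h_to_elements h_ polymer (h_to_elements h_ polymer)

-- ===== LEMMAS AND PROOFS =====

-- the first letter of a pair key, as both ports compute it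
def pvKey (pc : String × Int) : Char := PySem.List.pyGetD pc.1.toList 0 ' '

-- the counting step both ports fold with
def pvStep (d : PySem.Dict Char Int) (pc : String × Int) : PySem.Dict Char Int :=
  d.modify (PySem.List.pyGetD pc.1.toList 0 ' ') 0 (· + pc.2)

theorem pvStep_getD (d : PySem.Dict Char Int) (pc : String × Int) (k : Char) :
    (pvStep d pc).getD k 0 = if k = pvKey pc then d.getD k 0 + pc.2 else d.getD k 0 := by
  simp only [pvStep, pvKey, PySem.Dict.getD_modify]
  split_ifs with h
  · rw [h]
  · rfl

theorem pv_getD_fold (l : List (String × Int)) (d : PySem.Dict Char Int) (k : Char) :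
    (l.foldl pvStep d).getD k 0
      = d.getD k 0 + (l.map (fun pc => if k = pvKey pc then pc.2 else 0)).sum := by
  induction l generalizing d with
  | nil => simp
  | cons p l ih =>
    rw [List.foldl_cons, ih, pvStep_getD, List.map_cons, List.sum_cons]
    split_ifs with h <;> ring

theorem pv_keys_fold (l : List (String × Int)) (d : PySem.Dict Char Int) :
    (l.foldl pvStep d).keys = PySem.Set.update d.keys (l.map pvKey) := by
  exact PySem.Dict.keys_foldl_modify_key l pvKey 0 (fun _ pc => (· + pc.2)) d

theorem pv_nodup_keys_fold (l : List (String × Int)) (d : PySem.Dict Char Int)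
    (h : d.keys.Nodup) : (l.foldl pvStep d).keys.Nodup :=
  PySem.Dict.nodup_keys_foldl_modify_key l pvKey 0 (fun _ pc => (· + pc.2)) d h

-- the final dict built from a list l of pairs and the extra letter e
def pvDict (l : List (String × Int)) (e : Char) : PySem.Dict Char Int :=
  ((l.foldl pvStep PySem.Dict.empty).modify e 0 (· + 1))

theorem pvDict_getD (l : List (String × Int)) (e k : Char) :
    (pvDict l e).getD k 0
      = (if k = e then (1 : Int) else 0)
        + (l.map (fun pc => if k = pvKey pc then pc.2 else 0)).sum := by
  rw [pvDict, PySem.Dict.getD_modify]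
  split_ifs with h
  · subst h; rw [pv_getD_fold]; simp; ring
  · rw [pv_getD_fold]; simp

theorem pvDict_nodup (l : List (String × Int)) (e : Char) : (pvDict l e).keys.Nodup := by
  rw [pvDict, PySem.Dict.keys_modify]
  have := pv_nodup_keys_fold l PySem.Dict.empty PySem.Dict.nodup_keys_empty
  cases hc : (l.foldl pvStep PySem.Dict.empty).contains e with
  | true => rw [PySem.Dict.keys_insert_of_contains _ _ hc]; exact this
  | false =>
    rw [PySem.Dict.keys_insert_of_not_contains _ _ hc]
    refine List.Nodup.append this (List.nodup_singleton e) ?_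
    intro x hx hx'
    simp at hx'
    subst hx'
    exact absurd ((PySem.Dict.contains_iff_mem_keys _ _).mpr hx) (by simp [hc])

theorem pvDict_mem_keys (l : List (String × Int)) (e k : Char) :
    k ∈ (pvDict l e).keys ↔ k = e ∨ k ∈ l.map pvKey := by
  rw [pvDict, PySem.Dict.keys_modify, PySem.Dict.mem_keys_insert, pv_keys_fold]
  simp [PySem.Set.mem_update, PySem.Dict.keys_empty]

theorem pvDict_perm_getD {l₁ l₂ : List (String × Int)} (e : Char) (hp : l₁.Perm l₂) (k : Char) :
    (pvDict l₁ e).getD k 0 = (pvDict l₂ e).getD k 0 := by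
  rw [pvDict_getD, pvDict_getD,
    (hp.map (fun pc => if k = pvKey pc then pc.2 else 0)).sum_eq]

theorem pvDict_perm_values {l₁ l₂ : List (String × Int)} (e : Char) (hp : l₁.Perm l₂) :
    (pvDict l₁ e).values.Perm (pvDict l₂ e).values := by
  rw [PySem.Dict.values_eq_map_keys _ (pvDict_nodup l₁ e) 0,
      PySem.Dict.values_eq_map_keys _ (pvDict_nodup l₂ e) 0]
  have hk : (pvDict l₁ e).keys.Perm (pvDict l₂ e).keys := by
    refine (List.perm_ext_iff_of_nodup (pvDict_nodup l₁ e) (pvDict_nodup l₂ e)).mpr ?_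
    intro k
    rw [pvDict_mem_keys, pvDict_mem_keys, hp.map pvKey |>.mem_iff]
  rw [List.map_congr_left (fun k _ => pvDict_perm_getD e hp k)]
  exact hk.map _

theorem pvDict_values_ne_nil (l : List (String × Int)) (e : Char) :
    (pvDict l e).values ≠ [] := by
  have : e ∈ (pvDict l e).keys := (pvDict_mem_keys l e e).mpr (Or.inl rfl)
  intro h
  have hk : (pvDict l e).keys = [] := by
    have hv : (pvDict l e).items = [] := by
      have := congrArg List.length h
      simpa [PySem.Dict.values] using this
    simp [PySem.Dict.keys, hv]
  rw [hk] at this; exact absurd this (List.not_mem_nil)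

-- head of the value-sorted-descending items is the max of the values
theorem pv_sorted_desc_head_last {xs : List (Char × Int)} {m : Char × Int} {t : List (Char × Int)}
    (hs : PySem.List.sorted xs (fun x => x.2) true = m :: t) :
    (∀ y ∈ xs, y.2 ≤ m.2) ∧
      (∀ y ∈ xs, ((m :: t).getLast (by simp)).2 ≤ y.2) := by
  constructor
  · exact fun y hy => PySem.List.key_head_sorted_rev_ge xs (fun x => x.2) hs y hy
  · intro y hy
    have hLne : (m :: t) ≠ [] := by simp
    have hmem : y ∈ m :: t := by
      rw [← hs]
      exact ((PySem.List.sorted_perm xs (fun x => x.2) true).mem_iff).mpr hy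
    have hpw : (m :: t).Pairwise (fun a b => b.2 ≤ a.2) := by
      rw [← hs]; exact PySem.List.sorted_pairwise_rev xs (fun x => x.2)
    have hdec : (m :: t).dropLast ++ [(m :: t).getLast hLne] = m :: t :=
      List.dropLast_append_getLast hLne
    rw [← hdec] at hpw hmem
    rcases List.mem_append.mp hmem with hy' | hy'
    · exact (List.pairwise_append.mp hpw).2.2 y hy' ((m :: t).getLast hLne) (by simp)
    · simp only [List.mem_singleton] at hy'
      rw [hy']

-- max/min of a nonempty Int list via max?/min? are determined by the order facts
theorem pv_max_eq {vs : List Int} {a : Int} (ha : a ∈ vs) (hmax : ∀ y ∈ vs, y ≤ a) :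
    (PySem.List.max? vs (fun x => x)).getD 0 = a := by
  cases hm : PySem.List.max? vs (fun x => x) with
  | none => rw [PySem.List.max?_eq_none_iff] at hm; subst hm; exact absurd ha (List.not_mem_nil)
  | some M =>
    simp only [Option.getD_some]
    exact le_antisymm (hmax M (PySem.List.max?_mem hm)) (PySem.List.max?_isMax hm a ha)

theorem pv_min_eq {vs : List Int} {a : Int} (ha : a ∈ vs) (hmin : ∀ y ∈ vs, a ≤ y) :
    (PySem.List.min? vs (fun x => x)).getD 0 = a := by
  cases hm : PySem.List.min? vs (fun x => x) with
  | none => rw [PySem.List.min?_eq_none_iff] at hm; subst hm; exact absurd ha (List.not_mem_nil)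
  | some M =>
    simp only [Option.getD_some]
    exact le_antisymm (PySem.List.min?_isMin hm a ha) (hmin M (PySem.List.min?_mem hm))

theorem pv_mem_values_of_mem_items {d : PySem.Dict Char Int} {p : Char × Int}
    (h : p ∈ d.items) : p.2 ∈ d.values := by
  simp only [PySem.Dict.values]
  exact List.mem_map_of_mem h

-- ===== VERDICT (by name: the statement is the Claim_ definition above) =====
theorem h_to_elements_spec : Claim_equal_h_to_elements := by
  intro h_ polymer _ _
  unfold Spec_h_to_elements h_to_elements h_to_elements_alt
  set items := (PySem.Dict.ofList h_).items with hitems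
  set e := PySem.List.pyGetD polymer.toList (-1) ' ' with he
  set t := PySem.List.sorted items (fun x => x.2) true with ht
  have hperm : t.Perm items := PySem.List.sorted_perm items (fun x => x.2) true
  -- both dicts in pvDict form
  show (PySem.List.pyGetD (PySem.List.sorted (pvDict t e).items (fun x => x.2) true) 0 (' ', 0)).2
      - (PySem.List.pyGetD (PySem.List.sorted (pvDict t e).items (fun x => x.2) true) (-1) (' ', 0)).2
    = (PySem.List.max? (pvDict items e).values (fun x => x)).getD 0
      - (PySem.List.min? (pvDict items e).values (fun x => x)).getD 0
  have hvperm : (pvDict t e).values.Perm (pvDict items e).values := pvDict_perm_values e hperm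
  -- the sorted answer is nonempty
  cases hs : PySem.List.sorted (pvDict t e).items (fun x => x.2) true with
  | nil =>
    rw [PySem.List.sorted_eq_nil_iff] at hs
    exact absurd (by simp [PySem.Dict.values, hs] : (pvDict t e).values = [])
      (pvDict_values_ne_nil t e)
  | cons m rest =>
    obtain ⟨hmax, hmin⟩ := pv_sorted_desc_head_last hs
    have hspne : (m :: rest : List (Char × Int)) ≠ [] := by simp
    rw [PySem.List.pyGetD_zero_cons, PySem.List.pyGetD_neg_one _ _ hspne]
    have hsub : ∀ y ∈ (m :: rest : List (Char × Int)), y ∈ (pvDict t e).items := by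
      intro y hy
      rw [← hs] at hy
      exact ((PySem.List.sorted_perm _ _ _).mem_iff).mp hy
    -- largest = max of values
    have hm2 : m.2 ∈ (pvDict items e).values :=
      hvperm.mem_iff.mp (pv_mem_values_of_mem_items (hsub m (by simp)))
    have hm2max : ∀ y ∈ (pvDict items e).values, y ≤ m.2 := by
      intro y hy
      have hy' : y ∈ (pvDict t e).values := hvperm.mem_iff.mpr hy
      simp only [PySem.Dict.values, List.mem_map] at hy'
      obtain ⟨p, hp, rfl⟩ := hy'
      exact hmax p hp
    -- smallest = min of values
    set lst := ((m :: rest : List (Char × Int)).getLast (by simp)) with hlst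
    have hlmem : lst ∈ (m :: rest : List (Char × Int)) := List.getLast_mem _
    have hl2 : lst.2 ∈ (pvDict items e).values :=
      hvperm.mem_iff.mp (pv_mem_values_of_mem_items (hsub lst hlmem))
    have hl2min : ∀ y ∈ (pvDict items e).values, lst.2 ≤ y := by
      intro y hy
      have hy' : y ∈ (pvDict t e).values := hvperm.mem_iff.mpr hy
      simp only [PySem.Dict.values, List.mem_map] at hy'
      obtain ⟨p, hp, rfl⟩ := hy'
      exact hmin p hp
    rw [pv_max_eq hm2 hm2max, pv_min_eq hl2 hl2min]
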